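-- pv_equiv track=rewrite | github.com/watronfire/PrimuxPort | src/main.py | calculateDegeneracy
-- ===== SOURCE A (Python) =====
-- IUPACExpandDict = { "A" : ["A"],
--                     "T" : ["T"],
--                     "G" : ["G"],
--                     "C" : ["C"],
--                     "M" : ["A", "C"],
--                     "R" : ["A", "G"],
--                     "W" : ["A", "T"],
--                     "S" : ["C", "G"],
--                     "Y" : ["T", "C"],
--                     "K" : ["T", "G"],
--                     "V" : ["A", "C", "G"],
--                     "H" : ["A", "T", "C"],
--                     "D" : ["A", "T", "G"],
--                     "B" : ["T", "C", "G"],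
--                     "N" : ["A", "T", "C", "G"] }
--
-- def calculateDegeneracy( seqA, seqB ):
--     returnDegen = 1
--     for i in range( len( seqA ) ):
--         baseA = seqA[i]
--         baseB = seqB[i]
--         if baseA != baseB:
--             returnDegen *= len( set( IUPACExpandDict[baseA] ).union( set( IUPACExpandDict[baseB] ) ) )
--         elif baseA not in "ATCG":
--             returnDegen *= len( IUPACExpandDict[baseA] )
--     return returnDegen
-- ===== SOURCE B (Python) =====
-- # Two staged passes instead of A's single running product with branches:
-- # pass 1 tallies how many positions have each degeneracy factor (the union-size
-- # formula len(set(a)|set(b)) is uniform: equal bases give len(exp[a]), equal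
-- # ATCG bases give 1), pass 2 returns the closed-form 2**c2 * 3**c3 * 4**c4.
-- IUPACExpandDict = { "A" : ["A"],
--                     "T" : ["T"],
--                     "G" : ["G"],
--                     "C" : ["C"],
--                     "M" : ["A", "C"],
--                     "R" : ["A", "G"],
--                     "W" : ["A", "T"],
--                     "S" : ["C", "G"],
--                     "Y" : ["T", "C"],
--                     "K" : ["T", "G"],
--                     "V" : ["A", "C", "G"],
--                     "H" : ["A", "T", "C"],
--                     "D" : ["A", "T", "G"],
--                     "B" : ["T", "C", "G"],
--                     "N" : ["A", "T", "C", "G"] }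
--
-- def calculateDegeneracy( seqA, seqB ):
--     tally = [0, 0, 0, 0, 0]
--     for i in range( len( seqA ) ):
--         tally[len( set( IUPACExpandDict[seqA[i]] ) | set( IUPACExpandDict[seqB[i]] ) )] += 1
--     return 2 ** tally[2] * 3 ** tally[3] * 4 ** tally[4]
-- ===== Notes on version B (the rewrite author's own statement) =====
-- stated objective: alternative
-- what changed: Replaces A's branchy running product by two staged passes: a branchless counting pass that tallies how many positions have each degeneracy factor (uniform union-size formula), then a closed-form exponentiation 2**c2 * 3**c3 * 4**c4 instead of any per-position multiplication.
import Mathlib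
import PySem

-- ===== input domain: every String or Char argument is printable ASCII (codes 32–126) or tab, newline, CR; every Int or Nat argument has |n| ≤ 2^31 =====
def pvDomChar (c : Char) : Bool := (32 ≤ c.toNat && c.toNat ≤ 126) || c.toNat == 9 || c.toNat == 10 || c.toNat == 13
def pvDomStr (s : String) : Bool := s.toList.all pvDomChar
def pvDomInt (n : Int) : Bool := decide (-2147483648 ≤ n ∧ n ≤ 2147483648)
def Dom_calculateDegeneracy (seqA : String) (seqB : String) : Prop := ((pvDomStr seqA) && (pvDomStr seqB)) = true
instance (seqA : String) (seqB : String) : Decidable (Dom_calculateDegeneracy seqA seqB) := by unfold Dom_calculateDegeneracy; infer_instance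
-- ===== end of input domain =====

-- B replaces A's branchy running product by two staged passes: a branchless
-- tally of per-position degeneracy factors, then closed-form exponentiation.

-- ===== PORT A =====
-- IUPACExpandDict[c]; returns [] where Python raises KeyError (excluded by Pre_)
def pvExpand (c : Char) : List Char :=
  if c = 'A' then ['A'] else if c = 'T' then ['T'] else if c = 'G' then ['G'] else if c = 'C' then ['C']
  else if c = 'M' then ['A', 'C'] else if c = 'R' then ['A', 'G'] else if c = 'W' then ['A', 'T']
  else if c = 'S' then ['C', 'G'] else if c = 'Y' then ['T', 'C'] else if c = 'K' then ['T', 'G']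
  else if c = 'V' then ['A', 'C', 'G'] else if c = 'H' then ['A', 'T', 'C'] else if c = 'D' then ['A', 'T', 'G']
  else if c = 'B' then ['T', 'C', 'G'] else if c = 'N' then ['A', 'T', 'C', 'G'] else []

def calculateDegeneracy (seqA : String) (seqB : String) : Int :=
  (PySem.List.pyRange 0 (seqA.toList.length : Int) 1).foldl (fun returnDegen i =>
    let baseA := PySem.List.pyGetD seqA.toList i ' '   -- seqA[i]; in range under Pre_
    let baseB := PySem.List.pyGetD seqB.toList i ' '   -- seqB[i]; in range under Pre_ (IndexError excluded)
    if baseA ≠ baseB then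
      returnDegen * ((PySem.Set.union (PySem.Set.ofList (pvExpand baseA)) (pvExpand baseB)).length : Int)
    else if ¬ (['A', 'T', 'C', 'G'].contains baseA) then
      returnDegen * ((pvExpand baseA).length : Int)
    else returnDegen) 1

-- ===== PORT B =====
-- len(set(IUPACExpandDict[a]) | set(IUPACExpandDict[b]))
def pvUnionLen (a : Char) (b : Char) : Nat :=
  (PySem.Set.union (PySem.Set.ofList (pvExpand a)) (pvExpand b)).length

def calculateDegeneracy_alt (seqA : String) (seqB : String) : Int :=
  -- pass 1: tally[k] += 1 at each position (list assignment ported as List.set; k is 1..4 under Pre_)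
  let tally := (PySem.List.pyRange 0 (seqA.toList.length : Int) 1).foldl
    (fun tally i =>
      let k := pvUnionLen (PySem.List.pyGetD seqA.toList i ' ') (PySem.List.pyGetD seqB.toList i ' ')
      tally.set k (tally.getD k 0 + 1)) ([0, 0, 0, 0, 0] : List Nat)
  -- pass 2: 2 ** tally[2] * 3 ** tally[3] * 4 ** tally[4] (exponents are nonnegative counts)
  (2 : Int) ^ (tally.getD 2 0) * (3 : Int) ^ (tally.getD 3 0) * (4 : Int) ^ (tally.getD 4 0)

-- ===== PRECONDITION & SPEC =====
def pvKeys : List Char := ['A', 'T', 'G', 'C', 'M', 'R', 'W', 'S', 'Y', 'K', 'V', 'H', 'D', 'B', 'N']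

def pvIUPAC (c : Char) : Bool := pvKeys.contains c

-- Exactly the inputs on which Python A returns: every seqA position (in both strings) carries
-- an IUPAC key (else KeyError) and seqB is at least as long as seqA (else IndexError).
def Pre_calculateDegeneracy (seqA : String) (seqB : String) : Prop :=
  seqA.toList.length ≤ seqB.toList.length ∧
  seqA.toList.all pvIUPAC = true ∧
  (seqB.toList.take seqA.toList.length).all pvIUPAC = true
instance (seqA : String) (seqB : String) : Decidable (Pre_calculateDegeneracy seqA seqB) := by
  unfold Pre_calculateDegeneracy; infer_instance

def pvWitness_calculateDegeneracy : String × String := ("AN", "RAT")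

def Spec_calculateDegeneracy (seqA : String) (seqB : String) (out : Int) : Prop := out = calculateDegeneracy_alt seqA seqB
instance (seqA : String) (seqB : String) (out : Int) : Decidable (Spec_calculateDegeneracy seqA seqB out) := by unfold Spec_calculateDegeneracy; infer_instance

-- ===== CLAIM (what is proved, stated in full; the proofs are below) =====
def Claim_equal_calculateDegeneracy : Prop := ∀ (seqA : String) (seqB : String), Dom_calculateDegeneracy seqA seqB → Pre_calculateDegeneracy seqA seqB → Spec_calculateDegeneracy seqA seqB (calculateDegeneracy seqA seqB)

-- ===== LEMMAS AND PROOFS =====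

-- on all 15×15 pairs of IUPAC keys, A's branchy factor equals pvUnionLen and that value is in {1,2,3,4}
lemma pvFactor_all : (pvKeys.all (fun a => pvKeys.all (fun b =>
    ((if a ≠ b then ((PySem.Set.union (PySem.Set.ofList (pvExpand a)) (pvExpand b)).length : Int)
      else if ¬ (['A', 'T', 'C', 'G'].contains a) then ((pvExpand a).length : Int) else 1)
     == (pvUnionLen a b : Int))
    && decide (pvUnionLen a b = 1 ∨ pvUnionLen a b = 2 ∨ pvUnionLen a b = 3 ∨ pvUnionLen a b = 4)))) = true := by
  decide

lemma pvFactor_eq (a : Char) (ha : a ∈ pvKeys) (b : Char) (hb : b ∈ pvKeys) :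
    (if a ≠ b then ((PySem.Set.union (PySem.Set.ofList (pvExpand a)) (pvExpand b)).length : Int)
     else if ¬ (['A', 'T', 'C', 'G'].contains a) then ((pvExpand a).length : Int) else 1)
    = (pvUnionLen a b : Int) := by
  have h := List.all_eq_true.mp (List.all_eq_true.mp pvFactor_all a ha) b hb
  simp only [Bool.and_eq_true, beq_iff_eq] at h
  exact h.1

lemma pvFactor_mem (a : Char) (ha : a ∈ pvKeys) (b : Char) (hb : b ∈ pvKeys) :
    pvUnionLen a b = 1 ∨ pvUnionLen a b = 2 ∨ pvUnionLen a b = 3 ∨ pvUnionLen a b = 4 := by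
  have h := List.all_eq_true.mp (List.all_eq_true.mp pvFactor_all a ha) b hb
  simp only [Bool.and_eq_true, decide_eq_true_eq] at h
  exact h.2

-- pass-2 value of a tally
def pvP (t : List Nat) : Int :=
  (2 : Int) ^ (t.getD 2 0) * (3 : Int) ^ (t.getD 3 0) * (4 : Int) ^ (t.getD 4 0)

-- one tally bump multiplies the pass-2 value by the factor
lemma pvP_bump (t : List Nat) (ht : t.length = 5) (k : Nat)
    (hk : k = 1 ∨ k = 2 ∨ k = 3 ∨ k = 4) :
    pvP (t.set k (t.getD k 0 + 1)) = pvP t * k := by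
  rcases t with _ | ⟨a, t⟩; · simp at ht
  rcases t with _ | ⟨b, t⟩; · simp at ht
  rcases t with _ | ⟨c, t⟩; · simp at ht
  rcases t with _ | ⟨d, t⟩; · simp at ht
  rcases t with _ | ⟨e, t⟩; · simp at ht
  rcases t with _ | ⟨f, t⟩
  case cons.cons.cons.cons.cons.cons => simp at ht
  rcases hk with rfl | rfl | rfl | rfl <;>
    simp [pvP, List.set, List.getD, pow_succ] <;> ring

lemma pvFoldl_mul_pull (fs : List Nat) (a c : Int) :
    fs.foldl (fun (x : Int) (k : Nat) => x * (k : Int)) (a * c) = fs.foldl (fun (x : Int) (k : Nat) => x * (k : Int)) a * c := by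
  induction fs generalizing a with
  | nil => rfl
  | cons k fs ih =>
      simp only [List.foldl_cons]
      rw [mul_right_comm, ih]

-- counting then exponentiating computes the running product
lemma pvMain (fs : List Nat) (t : List Nat) (acc : Int)
    (hv : ∀ k ∈ fs, k = 1 ∨ k = 2 ∨ k = 3 ∨ k = 4) (ht : t.length = 5) :
    acc * pvP (fs.foldl (fun t k => t.set k (t.getD k 0 + 1)) t)
      = fs.foldl (fun (x : Int) (k : Nat) => x * (k : Int)) acc * pvP t := by
  induction fs generalizing t acc with
  | nil => simp
  | cons k fs ih =>
      simp only [List.foldl_cons]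
      rw [ih _ _ (fun k hk => hv k (List.mem_cons_of_mem _ hk)) (by simp [ht]),
          pvP_bump t ht k (hv k (by simp)),
          pvFoldl_mul_pull]
      ring

theorem calculateDegeneracy_spec : Claim_equal_calculateDegeneracy := by
  intro seqA seqB _ hpre
  obtain ⟨hlen, hA, hB⟩ := hpre
  unfold Spec_calculateDegeneracy calculateDegeneracy calculateDegeneracy_alt
  -- membership of each indexed character in pvKeys
  have hmem : ∀ i ∈ PySem.List.pyRange 0 (seqA.toList.length : Int) 1,
      PySem.List.pyGetD seqA.toList i ' ' ∈ pvKeys ∧ PySem.List.pyGetD seqB.toList i ' ' ∈ pvKeys := by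
    intro i hi
    rw [PySem.List.mem_pyRange_one] at hi
    obtain ⟨h0, hlt⟩ := hi
    have hltA : i.toNat < seqA.toList.length := by omega
    have e1 : PySem.List.pyGetD seqA.toList i ' ' = seqA.toList[i.toNat] :=
      PySem.List.pyGetD_eq_getElem _ ' ' h0 (by exact_mod_cast hlt)
    have e2 : PySem.List.pyGetD seqB.toList i ' ' = seqB.toList[i.toNat]'(by omega) :=
      PySem.List.pyGetD_eq_getElem _ ' ' h0 (by omega)
    constructor
    · rw [e1]
      have := List.all_eq_true.mp hA _ (List.getElem_mem hltA)
      simpa [pvIUPAC] using this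
    · rw [e2]
      have hmem' : (seqB.toList.take seqA.toList.length)[i.toNat]'(by
          simpa [List.length_take] using (by omega : i.toNat < min seqA.toList.length seqB.toList.length)) ∈
          seqB.toList.take seqA.toList.length := List.getElem_mem _
      have := List.all_eq_true.mp hB _ hmem'
      simpa [pvIUPAC, List.getElem_take] using this
  -- rewrite A's fold to the uniform per-position factor
  have hAeq : (PySem.List.pyRange 0 (seqA.toList.length : Int) 1).foldl (fun returnDegen i =>
      let baseA := PySem.List.pyGetD seqA.toList i ' '
      let baseB := PySem.List.pyGetD seqB.toList i ' '
      if baseA ≠ baseB then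
        returnDegen * ((PySem.Set.union (PySem.Set.ofList (pvExpand baseA)) (pvExpand baseB)).length : Int)
      else if ¬ (['A', 'T', 'C', 'G'].contains baseA) then
        returnDegen * ((pvExpand baseA).length : Int)
      else returnDegen) 1
      = (PySem.List.pyRange 0 (seqA.toList.length : Int) 1).foldl (fun x i =>
          x * ((pvUnionLen (PySem.List.pyGetD seqA.toList i ' ') (PySem.List.pyGetD seqB.toList i ' ') : Nat) : Int)) 1 := by
    apply PySem.List.foldl_congr_mem
    intro acc i hi
    obtain ⟨ha, hb⟩ := hmem i hi
    have h := pvFactor_eq _ ha _ hb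
    simp only []
    split_ifs at h ⊢ with h1 h2 <;> first | rw [h] | simp [← h]
  rw [hAeq]
  have hv : ∀ k ∈ (PySem.List.pyRange 0 (seqA.toList.length : Int) 1).map
      (fun i => pvUnionLen (PySem.List.pyGetD seqA.toList i ' ') (PySem.List.pyGetD seqB.toList i ' ')),
      k = 1 ∨ k = 2 ∨ k = 3 ∨ k = 4 := by
    intro k hk
    rw [List.mem_map] at hk
    obtain ⟨i, hi, rfl⟩ := hk
    obtain ⟨ha, hb⟩ := hmem i hi
    exact pvFactor_mem _ ha _ hb
  have h := pvMain ((PySem.List.pyRange 0 (seqA.toList.length : Int) 1).map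
      (fun i => pvUnionLen (PySem.List.pyGetD seqA.toList i ' ') (PySem.List.pyGetD seqB.toList i ' ')))
      ([0, 0, 0, 0, 0] : List Nat) 1 hv (by simp)
  simp only [List.foldl_map] at h
  simpa [pvP] using h.symm
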